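-- pv_equiv track=rewrite | github.com/OTOTO233/privacy-community-detection | src/pmcdm/dh_louvain.py | _reindex
-- ===== SOURCE A (Python) =====
-- from typing import Dict, List
--
-- def _reindex(communities: Dict[int, int]) -> Dict[int, int]:
--     mapping: Dict[int, int] = {}
--     new_map: Dict[int, int] = {}
--     for node, cid in communities.items():
--         if cid not in mapping:
--             mapping[cid] = len(mapping)
--         new_map[node] = mapping[cid]
--     return new_map
-- ===== SOURCE B (Python) =====
-- from typing import Dict
--
-- def _reindex(communities: Dict[int, int]) -> Dict[int, int]:
--     # Rank each community id by the position of its FIRST occurrence: sort the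
--     # distinct ids by that position, then the sorted position IS the new id.
--     vals = list(communities.values())
--     rank = {cid: r for r, cid in enumerate(sorted(set(vals), key=vals.index))}
--     return {node: rank[cid] for node, cid in communities.items()}
-- ===== Notes on version B (the rewrite author's own statement) =====
-- stated objective: alternative
-- what changed: Instead of growing an index table lazily inside the single loop, B computes each distinct community id's first-occurrence position with list.index, SORTS the distinct ids by that position so the sorted rank is the new id, and then applies the rank table in a separate pass.
import Mathlib
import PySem

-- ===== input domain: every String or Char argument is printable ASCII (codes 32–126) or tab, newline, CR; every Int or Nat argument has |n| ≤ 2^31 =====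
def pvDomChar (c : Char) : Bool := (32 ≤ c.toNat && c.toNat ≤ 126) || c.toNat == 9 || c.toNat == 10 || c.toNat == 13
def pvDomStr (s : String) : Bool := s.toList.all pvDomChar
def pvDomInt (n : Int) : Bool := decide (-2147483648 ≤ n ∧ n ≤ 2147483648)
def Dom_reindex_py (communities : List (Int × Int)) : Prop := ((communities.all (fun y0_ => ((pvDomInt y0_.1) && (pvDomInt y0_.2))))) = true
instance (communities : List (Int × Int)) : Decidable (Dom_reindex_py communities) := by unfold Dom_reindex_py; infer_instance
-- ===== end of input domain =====

-- B replaces A's single loop (which lazily grows the index table) by a sort-based algorithm: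
-- the distinct ids are sorted by first-occurrence position, the sorted rank is the new id,
-- applied in a separate pass; alternative decomposition, same behaviour.

-- ===== PORT A =====
-- one loop step of A: maybe extend `mapping`, then record new_map[node] = mapping[cid]
def pvStepA (st : PySem.Dict Int Int × PySem.Dict Int Int) (p : Int × Int) :
    PySem.Dict Int Int × PySem.Dict Int Int :=
  let mapping := if st.1.contains p.2 then st.1 else st.1.insert p.2 (st.1.size : Int)
  (mapping, st.2.insert p.1 (mapping.getD p.2 0))

def reindex_py (communities : List (Int × Int)) : List (Int × Int) :=
  (communities.foldl pvStepA (PySem.Dict.empty, PySem.Dict.empty)).2.items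

-- ===== PORT B =====
-- sorted(set(vals), key=vals.index): CPython's set order is arbitrary, but the key
-- (first-occurrence position) is injective on the distinct ids, so the stable sort's result
-- does not depend on it; PySem.Set.ofList is one valid enumeration of the set.
-- vals.index(c) always succeeds here (c ∈ vals), so `.getD 0` is exact.
def pvOrderB (vals : List Int) : List Int :=
  PySem.List.sorted (PySem.Set.ofList vals) (fun c => (PySem.List.index? vals c).getD 0) false

-- rank = {cid: r for r, cid in enumerate(sorted(set(vals), key=vals.index))}
def pvRankB (vals : List Int) : PySem.Dict Int Int :=
  (PySem.List.enumerate (pvOrderB vals) 0).foldl (fun d p => d.insert p.2 p.1) PySem.Dict.empty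

def reindex_py_alt (communities : List (Int × Int)) : List (Int × Int) :=
  let vals := communities.map (fun p => p.2)
  (communities.foldl (fun d p => d.insert p.1 ((pvRankB vals).getD p.2 0))
    PySem.Dict.empty).items

-- ===== PRECONDITION & SPEC =====
def Spec_reindex_py (communities : List (Int × Int)) (out : List (Int × Int)) : Prop := out = reindex_py_alt communities
instance (communities : List (Int × Int)) (out : List (Int × Int)) : Decidable (Spec_reindex_py communities out) := by unfold Spec_reindex_py; infer_instance

-- ===== CLAIM (what is proved, stated in full; the proofs are below) =====
def Claim_equal_reindex_py : Prop := ∀ (communities : List (Int × Int)), Dom_reindex_py communities → Spec_reindex_py communities (reindex_py communities)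

-- ===== LEMMAS AND PROOFS =====

-- A's mapping-growing step, on the cid alone
def pvG (m : PySem.Dict Int Int) (c : Int) : PySem.Dict Int Int :=
  if m.contains c then m else m.insert c (m.size : Int)

theorem pvStepA_eq (st : PySem.Dict Int Int × PySem.Dict Int Int) (p : Int × Int) :
    pvStepA st p = (pvG st.1 p.2, st.2.insert p.1 ((pvG st.1 p.2).getD p.2 0)) := by
  simp [pvStepA, pvG]

-- entries of the mapping never change once assigned
theorem pvG_mono (l : List Int) (m : PySem.Dict Int Int) (c : Int) (v : Int)
    (h : m.get? c = some v) : (l.foldl pvG m).get? c = some v := by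
  induction l generalizing m with
  | nil => exact h
  | cons x xs ih =>
    apply ih
    unfold pvG
    by_cases hx : m.contains x = true
    · simp [hx, h]
    · have hc : c ≠ x := by
        intro hcx; subst hcx
        rw [PySem.Dict.contains_eq_isSome_get?, h] at hx; simp at hx
      rw [if_neg (by simp [hx]), PySem.Dict.get?_insert_of_ne _ _ hc]
      exact h

theorem pvG_get?_isSome (m : PySem.Dict Int Int) (c : Int) :
    ((pvG m c).get? c).isSome := by
  unfold pvG
  by_cases hx : m.contains c = true
  · rw [if_pos hx, ← PySem.Dict.contains_eq_isSome_get?]; exact hx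
  · rw [if_neg (by simp [hx]), PySem.Dict.get?_insert_self]; rfl

-- A's new_map is a single insert-fold that looks values up in the FINAL mapping
theorem pvA_snd (l : List (Int × Int)) (m nm : PySem.Dict Int Int) :
    (l.foldl pvStepA (m, nm)).2 =
      l.foldl (fun d p => d.insert p.1 ((l.foldl (fun m' p => pvG m' p.2) m).getD p.2 0)) nm := by
  induction l generalizing m nm with
  | nil => rfl
  | cons p rest ih =>
    simp only [List.foldl_cons, pvStepA_eq]
    rw [ih]
    have hval : (pvG m p.2).getD p.2 0 =
        (rest.foldl (fun m' q => pvG m' q.2) (pvG m p.2)).getD p.2 0 := by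
      obtain ⟨v, hv⟩ := Option.isSome_iff_exists.mp (pvG_get?_isSome m p.2)
      have : ((rest.map (fun q => q.2)).foldl pvG (pvG m p.2)).get? p.2 = some v :=
        pvG_mono _ _ _ _ hv
      rw [List.foldl_map] at this
      rw [PySem.Dict.getD_eq_get?_getD, PySem.Dict.getD_eq_get?_getD, hv, this]
    rw [hval]

theorem pvEnum_append {α : Type} (xs : List α) (y : α) (s : Int) :
    PySem.List.enumerate (xs ++ [y]) s =
      PySem.List.enumerate xs s ++ [(s + xs.length, y)] := by
  induction xs generalizing s with
  | nil => simp [PySem.List.enumerate_nil, PySem.List.enumerate_cons]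
  | cons x xs ih =>
    simp only [List.cons_append, PySem.List.enumerate_cons, ih, List.length_cons]
    have h1 : (s : Int) + 1 + ↑xs.length = s + ↑(xs.length + 1) := by push_cast; ring
    rw [h1]

-- along dedup cs the first-occurrence index in cs is strictly increasing
theorem pvDedup_pairwise (cs : List Int) :
    (PySem.List.dedup cs).Pairwise
      (fun a b => (PySem.List.index? cs a).getD 0 < (PySem.List.index? cs b).getD 0) := by
  induction cs using List.reverseRecOn with
  | nil => simp [PySem.List.dedup_eq_ofList, PySem.Set.ofList]
  | append_singleton cs c ih =>
    have hidx : ∀ a ∈ PySem.List.dedup cs,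
        PySem.List.index? (cs ++ [c]) a = PySem.List.index? cs a := by
      intro a ha
      exact PySem.List.index?_append_of_mem _ ((PySem.List.mem_dedup cs a).mp ha)
    by_cases hc : c ∈ cs
    · have hmem : c ∈ PySem.Set.ofList cs := by
        rw [← PySem.List.dedup_eq_ofList]; exact (PySem.List.mem_dedup cs c).mpr hc
      have hded : PySem.List.dedup (cs ++ [c]) = PySem.List.dedup cs := by
        rw [PySem.List.dedup_eq_ofList, PySem.Set.ofList_append_singleton,
          PySem.Set.add_of_mem hmem, ← PySem.List.dedup_eq_ofList]
      rw [hded]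
      refine List.Pairwise.imp_of_mem ?_ ih
      intro a b ha hb hab
      rw [hidx a ha, hidx b hb]; exact hab
    · have hnm : c ∉ PySem.Set.ofList cs := by
        rw [← PySem.List.dedup_eq_ofList]
        exact fun h => hc ((PySem.List.mem_dedup cs c).mp h)
      have hded : PySem.List.dedup (cs ++ [c]) = PySem.List.dedup cs ++ [c] := by
        rw [PySem.List.dedup_eq_ofList, PySem.Set.ofList_append_singleton,
          PySem.Set.add_of_not_mem hnm, ← PySem.List.dedup_eq_ofList]
      rw [hded, List.pairwise_append]
      refine ⟨?_, by simp, ?_⟩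
      · refine List.Pairwise.imp_of_mem ?_ ih
        intro a b ha hb hab
        rw [hidx a ha, hidx b hb]; exact hab
      · intro a ha b hb
        rw [List.mem_singleton] at hb; subst hb
        have hac : a ∈ cs := (PySem.List.mem_dedup cs a).mp ha
        obtain ⟨k, hk⟩ := Option.isSome_iff_exists.mp
          ((PySem.List.index?_isSome_iff cs a).mpr hac)
        obtain ⟨hklt, -, -⟩ := PySem.List.getElem_of_index?_eq_some hk
        rw [hidx a ha, hk, PySem.List.index?_append_singleton_self cs b hc]
        simpa using hklt

-- sorting the distinct ids by first occurrence yields exactly the first-appearance dedup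
theorem pvOrderB_eq (vals : List Int) : pvOrderB vals = PySem.List.dedup vals := by
  unfold pvOrderB
  exact PySem.List.sorted_eq_of_perm_of_pairwise_lt (PySem.Set.ofList vals)
    (PySem.List.dedup vals) _
    (by rw [PySem.List.dedup_eq_ofList]) (pvDedup_pairwise vals)

-- A's mapping fold has exactly B's rank table's items, swapped
theorem pvMapA_items (cs : List Int) :
    (cs.foldl pvG PySem.Dict.empty).items =
      (PySem.List.enumerate (PySem.List.dedup cs) 0).map (fun p => (p.2, p.1)) := by
  induction cs using List.reverseRecOn with
  | nil => rfl
  | append_singleton cs c ih =>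
    rw [List.foldl_append, List.foldl_cons, List.foldl_nil]
    set M := cs.foldl pvG PySem.Dict.empty with hM
    have hkeys : M.keys = PySem.List.dedup cs := by
      show M.items.map (fun p => p.1) = _
      rw [ih, List.map_map]
      have : ((fun p => p.1) ∘ (fun (p : Int × Int) => (p.2, p.1))) = (fun p => p.2) := rfl
      rw [this, PySem.List.map_snd_enumerate]
    have hcont : M.contains c = (decide (c ∈ PySem.List.dedup cs)) := by
      rw [PySem.Dict.contains_eq_decide_mem_keys, hkeys]
    have hsize : M.size = (PySem.List.dedup cs).length := by
      show M.items.length = _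
      rw [ih, List.length_map, PySem.List.length_enumerate]
    rw [PySem.List.dedup_eq_ofList, PySem.Set.ofList_append_singleton]
    by_cases hc : c ∈ PySem.List.dedup cs
    · have hmem : c ∈ PySem.Set.ofList cs := by rwa [PySem.List.dedup_eq_ofList] at hc
      have hccs : c ∈ cs := (PySem.List.mem_dedup cs c).mp (by rwa [← PySem.List.dedup_eq_ofList] at hmem)
      rw [PySem.Set.add_of_mem hmem]
      have : M.contains c = true := by rw [hcont]; simp [hccs]
      rw [pvG, if_pos this, ih, PySem.List.dedup_eq_ofList]
    · have hmem : c ∉ PySem.Set.ofList cs := by rwa [PySem.List.dedup_eq_ofList] at hc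
      have hccs : c ∉ cs := fun h => hmem (by rw [← PySem.List.dedup_eq_ofList]; exact (PySem.List.mem_dedup cs c).mpr h)
      rw [PySem.Set.add_of_not_mem hmem]
      have hcf : M.contains c = false := by rw [hcont]; simp [hccs]
      rw [pvG, if_neg (by simp [hcf]), PySem.Dict.items_insert_of_not_contains (h := hcf),
        ih, pvEnum_append, List.map_append, hsize]
      simp [PySem.List.dedup_eq_ofList]

theorem pvMapA_eq_rankB (communities : List (Int × Int)) :
    communities.foldl (fun m' p => pvG m' p.2) PySem.Dict.empty =
      pvRankB (communities.map (fun p => p.2)) := by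
  apply PySem.Dict.ext
  rw [← List.foldl_map (f := fun p : Int × Int => p.2) (g := pvG), pvMapA_items]
  unfold pvRankB
  rw [pvOrderB_eq]
  exact (PySem.Dict.items_foldl_insert_fresh
    (l := PySem.List.enumerate (PySem.List.dedup (communities.map (fun p => p.2))) 0)
    (k := fun p : Int × Int => p.2) (v := fun p : Int × Int => p.1) (d := PySem.Dict.empty)
    (fun a _ => PySem.Dict.contains_empty _)
    (by rw [PySem.List.map_snd_enumerate]; exact PySem.List.nodup_dedup _)).symm

-- ===== VERDICT (by name: the statement is the Claim_ definition above) =====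
theorem reindex_py_spec : Claim_equal_reindex_py := by
  intro communities _
  show reindex_py communities = reindex_py_alt communities
  unfold reindex_py reindex_py_alt
  rw [pvA_snd, pvMapA_eq_rankB]
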